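-- pv_equiv track=rewrite | github.com/franpavlovi/Kolegij-Skriptni-Jezici | Python/ZADATCI FRAN PAVLOVIĆ/ProvjeraFrekvencijaZnamenkiUBrojevimaLosijeRjesenje.py | provjera_frekvencija
-- ===== SOURCE A (Python) =====
-- def provjera_frekvencija(lista):
--
--     frekvencije = {
--         0: 0,
--         1: 0,
--         2: 0,
--         3: 0,
--         4: 0,
--         5: 0,
--         6: 0,
--         7: 0,
--         8: 0,
--         9: 0,
--         }
--
--     for broj in lista:
--         for znamenka in str(broj):
--             if znamenka == '0':
--                 frekvencije[0] += 1
--             elif znamenka == '1':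
--                 frekvencije[1] += 1
--             elif znamenka == '2':
--                 frekvencije[2] += 1
--             elif znamenka == '3':
--                 frekvencije[3] += 1
--             elif znamenka == '4':
--                 frekvencije[4] += 1
--             elif znamenka == '5':
--                 frekvencije[5] += 1
--             elif znamenka == '6':
--                 frekvencije[6] += 1
--             elif znamenka == '7':
--                 frekvencije[7] += 1
--             elif znamenka == '8':
--                 frekvencije[8] += 1
--             elif znamenka == '9':
--                 frekvencije[9] += 1
--
--     return frekvencije
-- ===== SOURCE B (Python) =====
-- def provjera_frekvencija(lista):
--     # Arithmetic digit extraction: no string conversion at all.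
--     # Repeated divmod by 10 on abs(broj) tallies each digit into a fixed array.
--     freq = [0] * 10
--     for broj in lista:
--         n = abs(broj)
--         if n == 0:
--             freq[0] += 1
--         while n:
--             n, r = divmod(n, 10)
--             freq[r] += 1
--     return dict(enumerate(freq))
-- ===== Notes on version B (the rewrite author's own statement) =====
-- stated objective: alternative
-- what changed: B counts digits arithmetically (abs + repeated divmod by 10 into a fixed 10-slot array, returned via dict(enumerate(freq))) instead of converting each number to a string and dispatching each character through a ten-way if/elif chain into a dict.
import Mathlib
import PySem

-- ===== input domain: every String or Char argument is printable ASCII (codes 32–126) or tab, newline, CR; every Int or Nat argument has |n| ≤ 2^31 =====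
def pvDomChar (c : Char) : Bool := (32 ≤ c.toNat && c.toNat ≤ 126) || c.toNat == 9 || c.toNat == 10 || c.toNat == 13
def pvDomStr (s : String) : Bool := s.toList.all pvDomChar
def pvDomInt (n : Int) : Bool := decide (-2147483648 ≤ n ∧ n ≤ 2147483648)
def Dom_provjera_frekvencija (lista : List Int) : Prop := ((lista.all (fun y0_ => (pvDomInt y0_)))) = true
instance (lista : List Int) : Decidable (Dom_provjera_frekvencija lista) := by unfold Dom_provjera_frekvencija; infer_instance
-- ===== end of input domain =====

-- B counts digits arithmetically (abs + repeated divmod by 10 into a fixed ten-slot array,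
-- returned via dict(enumerate(freq))) instead of A's per-character if/elif dispatch on str(broj).

-- ===== PORT A =====
-- the body of A's inner loop: the if/elif chain incrementing the matching digit key
def pvStepA (d : PySem.Dict Int Int) (znamenka : Char) : PySem.Dict Int Int :=
  if znamenka = '0' then d.modify 0 0 (· + 1)
  else if znamenka = '1' then d.modify 1 0 (· + 1)
  else if znamenka = '2' then d.modify 2 0 (· + 1)
  else if znamenka = '3' then d.modify 3 0 (· + 1)
  else if znamenka = '4' then d.modify 4 0 (· + 1)
  else if znamenka = '5' then d.modify 5 0 (· + 1)
  else if znamenka = '6' then d.modify 6 0 (· + 1)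
  else if znamenka = '7' then d.modify 7 0 (· + 1)
  else if znamenka = '8' then d.modify 8 0 (· + 1)
  else if znamenka = '9' then d.modify 9 0 (· + 1)
  else d

def provjera_frekvencija (lista : List Int) : List (Int × Int) :=
  let frekvencije : PySem.Dict Int Int :=
    PySem.Dict.ofList [(0,0),(1,0),(2,0),(3,0),(4,0),(5,0),(6,0),(7,0),(8,0),(9,0)]
  let frekvencije :=
    lista.foldl (fun d broj => (PySem.Int.toChars broj).foldl pvStepA d) frekvencije
  frekvencije.items

-- ===== PORT B =====
-- the while loop: n, r = divmod(n, 10); freq[r] += 1   (n is a nonnegative int here)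
def pvDigLoop (n : Nat) (freq : List Int) : List Int :=
  if h : n = 0 then freq
  else pvDigLoop (n / 10) (freq.set (n % 10) (freq.getD (n % 10) 0 + 1))
termination_by n
decreasing_by exact Nat.div_lt_self (Nat.pos_of_ne_zero h) (by norm_num)

def provjera_frekvencija_alt (lista : List Int) : List (Int × Int) :=
  let freq :=
    lista.foldl (fun f broj =>
      let n := broj.natAbs
      let f := if n = 0 then f.set 0 (f.getD 0 0 + 1) else f
      pvDigLoop n f) (List.replicate 10 (0 : Int))
  PySem.List.enumerate freq 0

-- ===== PRECONDITION & SPEC =====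
def Spec_provjera_frekvencija (lista : List Int) (out : List (Int × Int)) : Prop := out = provjera_frekvencija_alt lista
instance (lista : List Int) (out : List (Int × Int)) : Decidable (Spec_provjera_frekvencija lista out) := by unfold Spec_provjera_frekvencija; infer_instance

-- ===== CLAIM (what is proved, stated in full; the proofs are below) =====
def Claim_equal_provjera_frekvencija : Prop := ∀ (lista : List Int), Dom_provjera_frekvencija lista → Spec_provjera_frekvencija lista (provjera_frekvencija lista)

-- ===== LEMMAS AND PROOFS =====

-- the little-endian decimal digits of a natural number (empty for 0)
def pvDig (n : Nat) : List Nat :=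
  if h : n = 0 then []
  else n % 10 :: pvDig (n / 10)
termination_by n
decreasing_by exact Nat.div_lt_self (Nat.pos_of_ne_zero h) (by norm_num)

-- the digits str(|n|) shows: [0] for 0, pvDig n otherwise
def pvCdig (n : Nat) : List Nat := if n = 0 then [0] else pvDig n

theorem pvDig_lt (n : Nat) : ∀ x ∈ pvDig n, x < 10 := by
  induction n using pvDig.induct with
  | case1 => simp [pvDig]
  | case2 n h ih =>
    rw [pvDig]; simp only [h, dite_false]
    intro x hx
    rcases List.mem_cons.mp hx with rfl | hx
    · exact Nat.mod_lt _ (by norm_num)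
    · exact ih x hx

-- a nested fold over the elements' character lists is the fold over the flattened character list
theorem pv_foldl_foldl {α β : Type} (l : List α) (f : α → List Char) (g : β → Char → β) (init : β) :
    l.foldl (fun acc x => (f x).foldl g acc) init = (l.flatMap f).foldl g init := by
  induction l generalizing init with
  | nil => rfl
  | cons a t ih => simp [List.foldl_append, ih]

-- A's fold over any character list, from an arbitrary ten-digit table
theorem pv_foldA (cs : List Char) (n0 n1 n2 n3 n4 n5 n6 n7 n8 n9 : Int) :
    cs.foldl pvStepA
      (PySem.Dict.mk [(0,n0),(1,n1),(2,n2),(3,n3),(4,n4),(5,n5),(6,n6),(7,n7),(8,n8),(9,n9)]) =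
    PySem.Dict.mk [(0, n0 + cs.count '0'), (1, n1 + cs.count '1'), (2, n2 + cs.count '2'),
      (3, n3 + cs.count '3'), (4, n4 + cs.count '4'), (5, n5 + cs.count '5'),
      (6, n6 + cs.count '6'), (7, n7 + cs.count '7'), (8, n8 + cs.count '8'),
      (9, n9 + cs.count '9')] := by
  induction cs generalizing n0 n1 n2 n3 n4 n5 n6 n7 n8 n9 with
  | nil => simp
  | cons c t ih =>
    simp only [List.foldl_cons]
    by_cases h0 : c = '0'
    · subst h0
      rw [show pvStepA (PySem.Dict.mk [(0,n0), (1,n1), (2,n2), (3,n3), (4,n4), (5,n5), (6,n6), (7,n7), (8,n8), (9,n9)]) '0'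
          = PySem.Dict.mk [(0,n0+1), (1,n1), (2,n2), (3,n3), (4,n4), (5,n5), (6,n6), (7,n7), (8,n8), (9,n9)] from by
        simp [pvStepA, PySem.Dict.modify, PySem.Dict.insert, PySem.Dict.getD, PySem.Dict.get?]]
      rw [ih]; simp; ring_nf
    by_cases h1 : c = '1'
    · subst h1
      rw [show pvStepA (PySem.Dict.mk [(0,n0), (1,n1), (2,n2), (3,n3), (4,n4), (5,n5), (6,n6), (7,n7), (8,n8), (9,n9)]) '1'
          = PySem.Dict.mk [(0,n0), (1,n1+1), (2,n2), (3,n3), (4,n4), (5,n5), (6,n6), (7,n7), (8,n8), (9,n9)] from by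
        simp [pvStepA, PySem.Dict.modify, PySem.Dict.insert, PySem.Dict.getD, PySem.Dict.get?]]
      rw [ih]; simp; ring_nf
    by_cases h2 : c = '2'
    · subst h2
      rw [show pvStepA (PySem.Dict.mk [(0,n0), (1,n1), (2,n2), (3,n3), (4,n4), (5,n5), (6,n6), (7,n7), (8,n8), (9,n9)]) '2'
          = PySem.Dict.mk [(0,n0), (1,n1), (2,n2+1), (3,n3), (4,n4), (5,n5), (6,n6), (7,n7), (8,n8), (9,n9)] from by
        simp [pvStepA, PySem.Dict.modify, PySem.Dict.insert, PySem.Dict.getD, PySem.Dict.get?]]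
      rw [ih]; simp; ring_nf
    by_cases h3 : c = '3'
    · subst h3
      rw [show pvStepA (PySem.Dict.mk [(0,n0), (1,n1), (2,n2), (3,n3), (4,n4), (5,n5), (6,n6), (7,n7), (8,n8), (9,n9)]) '3'
          = PySem.Dict.mk [(0,n0), (1,n1), (2,n2), (3,n3+1), (4,n4), (5,n5), (6,n6), (7,n7), (8,n8), (9,n9)] from by
        simp [pvStepA, PySem.Dict.modify, PySem.Dict.insert, PySem.Dict.getD, PySem.Dict.get?]]
      rw [ih]; simp; ring_nf
    by_cases h4 : c = '4'
    · subst h4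
      rw [show pvStepA (PySem.Dict.mk [(0,n0), (1,n1), (2,n2), (3,n3), (4,n4), (5,n5), (6,n6), (7,n7), (8,n8), (9,n9)]) '4'
          = PySem.Dict.mk [(0,n0), (1,n1), (2,n2), (3,n3), (4,n4+1), (5,n5), (6,n6), (7,n7), (8,n8), (9,n9)] from by
        simp [pvStepA, PySem.Dict.modify, PySem.Dict.insert, PySem.Dict.getD, PySem.Dict.get?]]
      rw [ih]; simp; ring_nf
    by_cases h5 : c = '5'
    · subst h5
      rw [show pvStepA (PySem.Dict.mk [(0,n0), (1,n1), (2,n2), (3,n3), (4,n4), (5,n5), (6,n6), (7,n7), (8,n8), (9,n9)]) '5'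
          = PySem.Dict.mk [(0,n0), (1,n1), (2,n2), (3,n3), (4,n4), (5,n5+1), (6,n6), (7,n7), (8,n8), (9,n9)] from by
        simp [pvStepA, PySem.Dict.modify, PySem.Dict.insert, PySem.Dict.getD, PySem.Dict.get?]]
      rw [ih]; simp; ring_nf
    by_cases h6 : c = '6'
    · subst h6
      rw [show pvStepA (PySem.Dict.mk [(0,n0), (1,n1), (2,n2), (3,n3), (4,n4), (5,n5), (6,n6), (7,n7), (8,n8), (9,n9)]) '6'
          = PySem.Dict.mk [(0,n0), (1,n1), (2,n2), (3,n3), (4,n4), (5,n5), (6,n6+1), (7,n7), (8,n8), (9,n9)] from by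
        simp [pvStepA, PySem.Dict.modify, PySem.Dict.insert, PySem.Dict.getD, PySem.Dict.get?]]
      rw [ih]; simp; ring_nf
    by_cases h7 : c = '7'
    · subst h7
      rw [show pvStepA (PySem.Dict.mk [(0,n0), (1,n1), (2,n2), (3,n3), (4,n4), (5,n5), (6,n6), (7,n7), (8,n8), (9,n9)]) '7'
          = PySem.Dict.mk [(0,n0), (1,n1), (2,n2), (3,n3), (4,n4), (5,n5), (6,n6), (7,n7+1), (8,n8), (9,n9)] from by
        simp [pvStepA, PySem.Dict.modify, PySem.Dict.insert, PySem.Dict.getD, PySem.Dict.get?]]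
      rw [ih]; simp; ring_nf
    by_cases h8 : c = '8'
    · subst h8
      rw [show pvStepA (PySem.Dict.mk [(0,n0), (1,n1), (2,n2), (3,n3), (4,n4), (5,n5), (6,n6), (7,n7), (8,n8), (9,n9)]) '8'
          = PySem.Dict.mk [(0,n0), (1,n1), (2,n2), (3,n3), (4,n4), (5,n5), (6,n6), (7,n7), (8,n8+1), (9,n9)] from by
        simp [pvStepA, PySem.Dict.modify, PySem.Dict.insert, PySem.Dict.getD, PySem.Dict.get?]]
      rw [ih]; simp; ring_nf
    by_cases h9 : c = '9'
    · subst h9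
      rw [show pvStepA (PySem.Dict.mk [(0,n0), (1,n1), (2,n2), (3,n3), (4,n4), (5,n5), (6,n6), (7,n7), (8,n8), (9,n9)]) '9'
          = PySem.Dict.mk [(0,n0), (1,n1), (2,n2), (3,n3), (4,n4), (5,n5), (6,n6), (7,n7), (8,n8), (9,n9+1)] from by
        simp [pvStepA, PySem.Dict.modify, PySem.Dict.insert, PySem.Dict.getD, PySem.Dict.get?]]
      rw [ih]; simp; ring_nf
    · rw [show pvStepA (PySem.Dict.mk [(0,n0), (1,n1), (2,n2), (3,n3), (4,n4), (5,n5), (6,n6), (7,n7), (8,n8), (9,n9)]) c = PySem.Dict.mk [(0,n0), (1,n1), (2,n2), (3,n3), (4,n4), (5,n5), (6,n6), (7,n7), (8,n8), (9,n9)] from by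
        simp [pvStepA, h0, h1, h2, h3, h4, h5, h6, h7, h8, h9]]
      rw [ih]; simp [h0, h1, h2, h3, h4, h5, h6, h7, h8, h9]

-- Nat.toDigitsCore (with enough fuel) produces the reversed pvDig digits
theorem pv_tdc : ∀ (f n : Nat) (l : List Char), 0 < n → n < 10 ^ f →
    Nat.toDigitsCore 10 f n l = ((pvDig n).reverse.map Nat.digitChar) ++ l := by
  intro f
  induction f with
  | zero => intro n l hn hlt; omega
  | succ f ih =>
    intro n l hn hlt
    rw [Nat.toDigitsCore]
    by_cases h : n / 10 = 0
    · rw [if_pos h, pvDig, dif_neg (by omega : ¬ n = 0), h, pvDig]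
      simp
    · rw [if_neg h, ih (n / 10) _ (Nat.pos_of_ne_zero h)
        (by
          rw [Nat.div_lt_iff_lt_mul (by norm_num : 0 < 10)]
          calc n < 10 ^ (f + 1) := hlt
            _ = 10 ^ f * 10 := by ring)]
      conv_rhs => rw [pvDig, dif_neg (by omega : ¬ n = 0)]
      simp [List.map_append]

theorem pv_toDigits_eq (m : Nat) (hm : 0 < m) :
    Nat.toDigits 10 m = (pvDig m).reverse.map Nat.digitChar := by
  have := pv_tdc (m + 1) m [] hm (by
    calc m < 10 ^ m := Nat.lt_pow_self (by norm_num)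
      _ ≤ 10 ^ (m + 1) := Nat.pow_le_pow_right (by norm_num) (Nat.le_succ m))
  simpa [Nat.toDigits] using this

theorem pv_count_map_digitChar (ds : List Nat) (h : ∀ x ∈ ds, x < 10) (d : Nat) (hd : d < 10) :
    (ds.map Nat.digitChar).count (Nat.digitChar d) = ds.count d := by
  induction ds with
  | nil => rfl
  | cons a t ih =>
    have ha : a < 10 := h a (List.mem_cons_self ..)
    have ht := fun x hx => h x (List.mem_cons_of_mem a hx)
    simp only [List.map_cons, List.count_cons, ih ht]
    congr 1
    have : (Nat.digitChar a == Nat.digitChar d) = (a == d) := by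
      interval_cases a <;> interval_cases d <;> decide
    rw [this]

-- count of the digit-d character in str(broj) = count of d among the arithmetic digits of |broj|
theorem pv_count_toChars (b : Int) (d : Nat) (hd : d < 10) :
    (PySem.Int.toChars b).count (Nat.digitChar d) = (pvCdig b.natAbs).count d := by
  have hdash : Nat.digitChar d ≠ '-' := by interval_cases d <;> decide
  have key : ∀ m : Nat, (Nat.toDigits 10 m).count (Nat.digitChar d) = (pvCdig m).count d := by
    intro m
    by_cases hm : m = 0
    · subst hm
      show (['0'].count (Nat.digitChar d)) = ([0].count d)
      interval_cases d <;> decide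
    · rw [pv_toDigits_eq m (Nat.pos_of_ne_zero hm)]
      unfold pvCdig
      rw [if_neg hm]
      rw [pv_count_map_digitChar _ (fun x hx => pvDig_lt m x (List.mem_reverse.mp hx)) d hd]
      exact List.count_reverse ..
  unfold PySem.Int.toChars
  by_cases hb : b < 0
  · rw [if_pos hb]
    rw [List.count_cons]
    simp [hdash.symm, key b.natAbs]
  · rw [if_neg hb]
    rw [show b.toNat = b.natAbs from by omega]
    exact key b.natAbs

theorem pvDigLoop_length (n : Nat) (freq : List Int) :
    (pvDigLoop n freq).length = freq.length := by
  induction n, freq using pvDigLoop.induct with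
  | case1 freq => rw [pvDigLoop]; simp
  | case2 n freq h ih =>
    rw [pvDigLoop, dif_neg h, ih, List.length_set]

theorem pvDigLoop_getD (n : Nat) (freq : List Int) (hlen : freq.length = 10)
    (d : Nat) (hd : d < 10) :
    (pvDigLoop n freq).getD d 0 = freq.getD d 0 + ((pvDig n).count d : Int) := by
  induction n, freq using pvDigLoop.induct with
  | case1 freq =>
    rw [pvDigLoop, pvDig]; simp
  | case2 n freq h ih =>
    rw [pvDigLoop, dif_neg h, pvDig, dif_neg h]
    rw [ih (by rw [List.length_set]; exact hlen)]
    have hmod : n % 10 < 10 := Nat.mod_lt _ (by norm_num)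
    rw [List.count_cons]
    have hset : (freq.set (n % 10) (freq.getD (n % 10) 0 + 1)).getD d 0
        = freq.getD d 0 + (if n % 10 = d then 1 else 0) := by
      by_cases he : n % 10 = d
      · subst he
        rw [if_pos rfl]
        rw [List.getD_eq_getElem?_getD, List.getElem?_set_self (by omega)]
        rw [List.getD_eq_getElem?_getD]
        simp
      · rw [if_neg he]
        rw [List.getD_eq_getElem?_getD, List.getElem?_set_ne he]
        simp [List.getD_eq_getElem?_getD]
    rw [hset]
    push_cast
    by_cases he : n % 10 = d
    · simp [he]
      ring
    · simp [he, beq_iff_eq]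

-- B's per-number step adds the pvCdig digit counts
theorem pv_stepB_getD (freq : List Int) (hlen : freq.length = 10) (broj : Int)
    (d : Nat) (hd : d < 10) :
    (pvDigLoop broj.natAbs
        (if broj.natAbs = 0 then freq.set 0 (freq.getD 0 0 + 1) else freq)).getD d 0
    = freq.getD d 0 + ((pvCdig broj.natAbs).count d : Int) := by
  by_cases h : broj.natAbs = 0
  · rw [h, if_pos rfl, pvDigLoop, dif_pos rfl]
    unfold pvCdig
    rw [if_pos rfl]
    by_cases he : d = 0
    · subst he
      rw [List.getD_eq_getElem?_getD, List.getElem?_set_self (by omega),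
        List.getD_eq_getElem?_getD]
      simp
    · rw [List.getD_eq_getElem?_getD, List.getElem?_set_ne (fun hc => he hc.symm),
        ← List.getD_eq_getElem?_getD]
      simp [Ne.symm he]
  · rw [if_neg h]
    rw [pvDigLoop_getD _ _ hlen d hd]
    unfold pvCdig
    rw [if_neg h]

theorem pv_foldB (lista : List Int) (freq : List Int) (hlen : freq.length = 10)
    (d : Nat) (hd : d < 10) :
    (lista.foldl (fun f broj =>
      pvDigLoop broj.natAbs
        (if broj.natAbs = 0 then f.set 0 (f.getD 0 0 + 1) else f)) freq).getD d 0
    = freq.getD d 0 + ((lista.flatMap (fun b => pvCdig b.natAbs)).count d : Int) := by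
  induction lista generalizing freq with
  | nil => simp
  | cons b t ih =>
    simp only [List.foldl_cons, List.flatMap_cons, List.count_append]
    have hlen' : (pvDigLoop b.natAbs
        (if b.natAbs = 0 then freq.set 0 (freq.getD 0 0 + 1) else freq)).length = 10 := by
      rw [pvDigLoop_length]
      by_cases h : b.natAbs = 0 <;> simp [h, hlen]
    rw [ih _ hlen']
    rw [pv_stepB_getD freq hlen b d hd]
    push_cast
    ring

theorem pv_foldB_length (lista : List Int) (freq : List Int) :
    (lista.foldl (fun f broj =>
      pvDigLoop broj.natAbs
        (if broj.natAbs = 0 then f.set 0 (f.getD 0 0 + 1) else f)) freq).length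
    = freq.length := by
  induction lista generalizing freq with
  | nil => rfl
  | cons b t ih =>
    simp only [List.foldl_cons]
    rw [ih, pvDigLoop_length]
    by_cases h : b.natAbs = 0 <;> simp [h, List.length_set]

theorem pv_count_flat (lista : List Int) (d : Nat) (hd : d < 10) :
    (lista.flatMap PySem.Int.toChars).count (Nat.digitChar d)
    = (lista.flatMap (fun b => pvCdig b.natAbs)).count d := by
  induction lista with
  | nil => rfl
  | cons b t ih =>
    simp only [List.flatMap_cons, List.count_append, ih, pv_count_toChars b d hd]

theorem pv_list10 (l : List Int) (h : l.length = 10) :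
    l = [l.getD 0 0, l.getD 1 0, l.getD 2 0, l.getD 3 0, l.getD 4 0,
         l.getD 5 0, l.getD 6 0, l.getD 7 0, l.getD 8 0, l.getD 9 0] := by
  match l, h with
  | [a0,a1,a2,a3,a4,a5,a6,a7,a8,a9], _ => rfl

-- ===== VERDICT (by name: the statement is the Claim_ definition above) =====
theorem provjera_frekvencija_spec : Claim_equal_provjera_frekvencija := by
  intro lista _
  simp only [Spec_provjera_frekvencija, provjera_frekvencija, provjera_frekvencija_alt]
  rw [pv_foldl_foldl]
  rw [show PySem.Dict.ofList [((0:Int),(0:Int)),(1,0),(2,0),(3,0),(4,0),(5,0),(6,0),(7,0),(8,0),(9,0)]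
      = PySem.Dict.mk [(0,0),(1,0),(2,0),(3,0),(4,0),(5,0),(6,0),(7,0),(8,0),(9,0)] from by decide]
  rw [pv_foldA]
  -- rewrite B's fold body into the named form and compute its entries
  have hbody : (fun (f : List Int) (broj : Int) =>
      pvDigLoop broj.natAbs
        (if broj.natAbs = 0 then f.set 0 (f.getD 0 0 + 1) else f)) =
      (fun f broj =>
        let n := broj.natAbs
        let f := if n = 0 then f.set 0 (f.getD 0 0 + 1) else f
        pvDigLoop n f) := rfl
  set F := lista.foldl (fun f broj =>
      let n := broj.natAbs
      let f := if n = 0 then f.set 0 (f.getD 0 0 + 1) else f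
      pvDigLoop n f) (List.replicate 10 (0 : Int)) with hF
  have hFlen : F.length = 10 := by
    rw [hF, ← hbody, pv_foldB_length]; rfl
  have hFd : ∀ d : Nat, d < 10 →
      F.getD d 0 = ((lista.flatMap (fun b => pvCdig b.natAbs)).count d : Int) := by
    intro d hd
    rw [hF, ← hbody, pv_foldB lista _ (by rfl) d hd]
    simp [List.getD_eq_getElem?_getD, hd]
    interval_cases d <;> rfl
  have hcnt : ∀ d : Nat, d < 10 →
      ((lista.flatMap PySem.Int.toChars).count (Nat.digitChar d) : Int) = F.getD d 0 := by
    intro d hd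
    rw [hFd d hd, pv_count_flat lista d hd]
  rw [pv_list10 F hFlen]
  simp only [PySem.List.enumerate]
  have e0 := hcnt 0 (by norm_num)
  have e1 := hcnt 1 (by norm_num)
  have e2 := hcnt 2 (by norm_num)
  have e3 := hcnt 3 (by norm_num)
  have e4 := hcnt 4 (by norm_num)
  have e5 := hcnt 5 (by norm_num)
  have e6 := hcnt 6 (by norm_num)
  have e7 := hcnt 7 (by norm_num)
  have e8 := hcnt 8 (by norm_num)
  have e9 := hcnt 9 (by norm_num)
  simp only [show Nat.digitChar 0 = '0' from rfl, show Nat.digitChar 1 = '1' from rfl,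
    show Nat.digitChar 2 = '2' from rfl, show Nat.digitChar 3 = '3' from rfl,
    show Nat.digitChar 4 = '4' from rfl, show Nat.digitChar 5 = '5' from rfl,
    show Nat.digitChar 6 = '6' from rfl, show Nat.digitChar 7 = '7' from rfl,
    show Nat.digitChar 8 = '8' from rfl, show Nat.digitChar 9 = '9' from rfl] at e0 e1 e2 e3 e4 e5 e6 e7 e8 e9
  simp [e0, e1, e2, e3, e4, e5, e6, e7, e8, e9]
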